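-- pv_equiv track=rewrite | github.com/victorcastaneda621/python-patricia-tries | data_structures/patricia_trie/transaction_to_bit_seq.py | bitSequence_to_transaction
-- ===== SOURCE A (Python) =====
-- def bitSequence_to_transaction(seq: int, index_to_item: dict):
--     t = set()
--     for i in range(0, len(index_to_item)):
--         shifted = seq >> i # Shift so bit i is the rightmost
--         if shifted == 0:
--             break # There are no more elements to add, no need to check
--         elif shifted & 1: # Check if the rightmost bit is 1
--             t.add(index_to_item[i])
--     return t
-- ===== SOURCE B (Python) =====
-- def bitSequence_to_transaction(seq: int, index_to_item: dict):
--     n = len(index_to_item)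
--     mask = seq & ((1 << n) - 1)  # keep only the in-range low bits; normalises negative seq
--     t = set()
--     while mask:
--         next_mask = mask & (mask - 1)              # clear the lowest set bit
--         i = (mask ^ next_mask).bit_length() - 1    # position of that bit
--         t.add(index_to_item[i])
--         mask = next_mask
--     return t
-- ===== Notes on version B (the rewrite author's own statement) =====
-- stated objective: alternative
-- what changed: Instead of scanning every index 0..n-1 and re-shifting seq at each step, B masks seq down to its n low bits once and then iterates only over the set bits, clearing the lowest set bit (mask &= mask-1) and recovering its position with bit_length, so only popcount(mask) iterations run.
import Mathlib
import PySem

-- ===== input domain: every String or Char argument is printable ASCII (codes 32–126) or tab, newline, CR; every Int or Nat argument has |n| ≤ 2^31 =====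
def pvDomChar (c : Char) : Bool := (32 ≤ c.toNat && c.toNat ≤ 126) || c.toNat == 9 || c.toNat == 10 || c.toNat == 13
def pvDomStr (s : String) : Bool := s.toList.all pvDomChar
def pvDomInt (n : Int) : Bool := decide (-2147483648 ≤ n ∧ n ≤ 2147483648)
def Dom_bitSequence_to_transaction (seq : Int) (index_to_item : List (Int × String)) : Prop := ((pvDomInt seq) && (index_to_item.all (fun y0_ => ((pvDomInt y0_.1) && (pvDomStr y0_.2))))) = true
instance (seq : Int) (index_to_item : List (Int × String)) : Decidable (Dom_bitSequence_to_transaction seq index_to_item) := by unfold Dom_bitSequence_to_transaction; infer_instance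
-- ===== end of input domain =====

-- B iterates only over the set bits of the once-masked value (clearing the lowest set bit each round)
-- instead of A's full index scan that re-shifts seq at every position; same returned set (alternative algorithm).

-- dict lookup d[k] (first match); Python raises KeyError when the key is absent — exactly those
-- inputs are excluded by Pre_ below, so the "" default is never the claimed value.
def pvGet (d : List (Int × String)) (k : Int) : String :=
  PySem.Dict.getD (PySem.Dict.mk d) k ""

-- ===== PORT A =====
def pvALoop (seq : Int) (d : List (Int × String)) : Nat → Nat → PySem.Set String → PySem.Set String
  | 0, _, t => t                       -- i has reached len(index_to_item)
  | fuel+1, i, t =>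
    if seq >>> i = 0 then t            -- shifted == 0: break
    else if PySem.Int.band (seq >>> i) 1 = 1 then
      pvALoop seq d fuel (i+1) (PySem.Set.add t (pvGet d (i : Int)))
    else pvALoop seq d fuel (i+1) t

def bitSequence_to_transaction (seq : Int) (index_to_item : List (Int × String)) : List String :=
  pvALoop seq index_to_item index_to_item.length 0 PySem.Set.empty

-- ===== PORT B =====
-- 'while mask:' — each round clears one set bit, so mask.toNat strictly decreases;
-- fuel = mask.toNat + 1 therefore over-counts the rounds and the 0-fuel case is unreachable.
def pvBLoop (d : List (Int × String)) : Nat → Int → PySem.Set String → PySem.Set String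
  | 0, _, t => t
  | fuel+1, mask, t =>
    if mask ≤ 0 then t                 -- 'while mask'; mask stays ≥ 0 (it starts as '&' of a nonnegative value)
    else
      pvBLoop d fuel (PySem.Int.band mask (mask - 1))
        (PySem.Set.add t
          (pvGet d ((PySem.Int.bitLength (PySem.Int.bxor mask (PySem.Int.band mask (mask - 1))) - 1 : Nat) : Int)))

def bitSequence_to_transaction_alt (seq : Int) (index_to_item : List (Int × String)) : List String :=
  pvBLoop index_to_item ((PySem.Int.band seq (((1 : Int) <<< index_to_item.length) - 1)).toNat + 1)
    (PySem.Int.band seq (((1 : Int) <<< index_to_item.length) - 1)) PySem.Set.empty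

-- ===== PRECONDITION & SPEC =====
-- Pre_ excludes (a) association lists with duplicate keys, which do not represent a Python dict
-- (the dict's len and lookups would disagree with the list's), and (b) inputs where some in-range
-- set bit's index is missing from the dict, on which A raises KeyError.
def Pre_bitSequence_to_transaction (seq : Int) (index_to_item : List (Int × String)) : Prop :=
  (index_to_item.map Prod.fst).Nodup ∧
  ∀ i : Nat, i < index_to_item.length →
    (seq >>> i ≠ 0 ∧ PySem.Int.band (seq >>> i) 1 = 1) →
    ((PySem.Dict.mk index_to_item).get? (i : Int)).isSome
instance (seq : Int) (index_to_item : List (Int × String)) : Decidable (Pre_bitSequence_to_transaction seq index_to_item) := by unfold Pre_bitSequence_to_transaction; infer_instance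

def pvWitness_bitSequence_to_transaction : Int × (List (Int × String)) :=
  (5, [(0, "a"), (1, "b"), (2, "c")])

def Spec_bitSequence_to_transaction (seq : Int) (index_to_item : List (Int × String)) (out : List String) : Prop := out = bitSequence_to_transaction_alt seq index_to_item
instance (seq : Int) (index_to_item : List (Int × String)) (out : List String) : Decidable (Spec_bitSequence_to_transaction seq index_to_item out) := by unfold Spec_bitSequence_to_transaction; infer_instance

-- ===== CLAIM (what is proved, stated in full; the proofs are below) =====
def Claim_equal_bitSequence_to_transaction : Prop := ∀ (seq : Int) (index_to_item : List (Int × String)), Dom_bitSequence_to_transaction seq index_to_item → Pre_bitSequence_to_transaction seq index_to_item → Spec_bitSequence_to_transaction seq index_to_item (bitSequence_to_transaction seq index_to_item)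

-- ===== LEMMAS AND PROOFS =====

-- the ascending list of set-bit positions of m, offset by i
def pvBitIdx (m i : Nat) : List Nat :=
  if m = 0 then [] else (if m % 2 = 1 then [i] else []) ++ pvBitIdx (m/2) (i+1)
termination_by m
decreasing_by exact Nat.div_lt_self (by omega) (by omega)

def pvAdd (d : List (Int × String)) (t : PySem.Set String) (j : Nat) : PySem.Set String :=
  PySem.Set.add t (pvGet d (j : Int))

theorem pvBitIdx_zero (i : Nat) : pvBitIdx 0 i = [] := by
  rw [pvBitIdx]; simp

theorem pvBitIdx_eq (m i : Nat) :
    pvBitIdx m i = (if m % 2 = 1 then [i] else []) ++ pvBitIdx (m/2) (i+1) := by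
  by_cases h : m = 0
  · subst h; simp [pvBitIdx_zero]
  · rw [pvBitIdx]; simp [h]

theorem pv_xor_two_mul (a b : Nat) : (2*a) ^^^ (2*b) = 2*(a ^^^ b) := by
  apply Nat.eq_of_testBit_eq
  intro k
  cases k with
  | zero =>
    rw [Nat.testBit_xor]
    simp only [Nat.testBit_zero]
    simp [show (2*a)%2 = 0 from by omega, show (2*b)%2 = 0 from by omega,
      show (2*(a^^^b))%2 = 0 from by omega]
  | succ k =>
    rw [Nat.testBit_xor]
    simp only [Nat.testBit_succ]
    rw [show 2*a/2 = a from by omega, show 2*b/2 = b from by omega,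
      show 2*(a^^^b)/2 = a^^^b from by omega, Nat.testBit_xor]

theorem pv_xor_odd (q : Nat) : (2*q+1) ^^^ (2*q) = 1 := by
  apply Nat.eq_of_testBit_eq
  intro k
  cases k with
  | zero =>
    rw [Nat.testBit_xor]
    simp only [Nat.testBit_zero]
    simp [show (2*q+1)%2 = 1 from by omega, show (2*q)%2 = 0 from by omega]
  | succ k =>
    rw [Nat.testBit_xor]
    simp only [Nat.testBit_succ]
    rw [show (2*q+1)/2 = q from by omega, show 2*q/2 = q from by omega,
      show (1:Nat)/2 = 0 from by omega]
    simp

theorem pv_and_pred_odd (q : Nat) : (2*q+1) &&& (2*q) = 2*q := by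
  apply Nat.eq_of_testBit_eq
  intro k
  cases k with
  | zero =>
    rw [Nat.testBit_land]
    simp only [Nat.testBit_zero]
    simp [show (2*q+1)%2 = 1 from by omega, show (2*q)%2 = 0 from by omega]
  | succ k =>
    rw [Nat.testBit_land]
    simp only [Nat.testBit_succ]
    rw [show (2*q+1)/2 = q from by omega, show 2*q/2 = q from by omega, Bool.and_self]

theorem pv_and_pred_even (q : Nat) (h : 0 < q) : (2*q) &&& (2*q-1) = 2*(q &&& (q-1)) := by
  rw [show 2*q-1 = 2*(q-1)+1 from by omega]
  apply Nat.eq_of_testBit_eq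
  intro k
  cases k with
  | zero =>
    rw [Nat.testBit_land]
    simp only [Nat.testBit_zero]
    simp [show (2*q)%2 = 0 from by omega, show (2*(q-1)+1)%2 = 1 from by omega,
      show (2*(q&&&(q-1)))%2 = 0 from by omega]
  | succ k =>
    rw [Nat.testBit_land]
    simp only [Nat.testBit_succ]
    rw [show 2*q/2 = q from by omega, show (2*(q-1)+1)/2 = q-1 from by omega,
      show 2*(q&&&(q-1))/2 = q&&&(q-1) from by omega, Nat.testBit_land]

theorem pv_and_pred_lt : ∀ m : Nat, 0 < m → m &&& (m-1) < m := by
  intro m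
  induction m using Nat.strong_induction_on with
  | _ m IH =>
    intro h
    rcases Nat.even_or_odd m with ⟨q, hq⟩ | ⟨q, hq⟩
    · subst hq
      have hq0 : 0 < q := by omega
      have e : q + q = 2*q := by ring
      rw [e, show 2*q - 1 = 2*(q-1)+1 from by omega]
      have hand : (2*q) &&& (2*(q-1)+1) = 2*(q &&& (q-1)) := by
        apply Nat.eq_of_testBit_eq
        intro k
        cases k with
        | zero =>
          rw [Nat.testBit_land]
          simp only [Nat.testBit_zero]
          simp [show (2*q)%2 = 0 from by omega, show (2*(q-1)+1)%2 = 1 from by omega,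
            show (2*(q&&&(q-1)))%2 = 0 from by omega]
        | succ k =>
          rw [Nat.testBit_land]
          simp only [Nat.testBit_succ]
          rw [show 2*q/2 = q from by omega, show (2*(q-1)+1)/2 = q-1 from by omega,
            show 2*(q&&&(q-1))/2 = q&&&(q-1) from by omega, Nat.testBit_land]
      rw [hand]
      have := IH q (by omega) hq0
      omega
    · subst hq
      rw [show 2*q+1-1 = 2*q from by omega]
      have hand : (2*q+1) &&& (2*q) = 2*q := by
        apply Nat.eq_of_testBit_eq
        intro k
        cases k with
        | zero =>
          rw [Nat.testBit_land]
          simp only [Nat.testBit_zero]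
          simp [show (2*q+1)%2 = 1 from by omega, show (2*q)%2 = 0 from by omega]
        | succ k =>
          rw [Nat.testBit_land]
          simp only [Nat.testBit_succ]
          rw [show (2*q+1)/2 = q from by omega, show 2*q/2 = q from by omega, Bool.and_self]
      rw [hand]
      omega

theorem pv_lsb_pos (m : Nat) (h : 0 < m) : 0 < m ^^^ (m &&& (m-1)) := by
  have hlt := pv_and_pred_lt m h
  rcases Nat.eq_zero_or_pos (m ^^^ (m &&& (m-1))) with h0 | h1
  · exfalso
    have : m = m &&& (m-1) := Nat.xor_eq_zero_iff.mp h0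
    omega
  · exact h1

theorem pv_bitLength_pos (m : Nat) (h : 0 < m) : 0 < PySem.Int.bitLength (m : Int) := by
  rw [PySem.Int.bitLength_natCast h]
  omega

theorem pvBitIdx_lsb : ∀ m : Nat, 0 < m → ∀ off : Nat,
    pvBitIdx m off =
      (PySem.Int.bitLength ((m ^^^ (m &&& (m-1)) : Nat) : Int) - 1 + off) :: pvBitIdx (m &&& (m-1)) off := by
  intro m
  induction m using Nat.strong_induction_on with
  | _ m IH =>
    intro h off
    rcases Nat.even_or_odd m with ⟨q, hq⟩ | ⟨q, hq⟩
    · subst hq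
      have e : q + q = 2*q := by ring
      rw [e]
      have hq0 : 0 < q := by omega
      have hLpos : 0 < q ^^^ (q &&& (q-1)) := pv_lsb_pos q hq0
      have hand : (2*q) &&& (2*q-1) = 2*(q &&& (q-1)) := pv_and_pred_even q hq0
      have hxor : (2*q) ^^^ ((2*q) &&& (2*q-1)) = 2*(q ^^^ (q &&& (q-1))) := by
        rw [hand, pv_xor_two_mul]
      rw [hxor, hand]
      have hbl : PySem.Int.bitLength ((2*(q ^^^ (q &&& (q-1))) : Nat) : Int)
          = PySem.Int.bitLength ((q ^^^ (q &&& (q-1)) : Nat) : Int) + 1 := by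
        rw [PySem.Int.bitLength_natCast (by omega : 0 < 2*(q ^^^ (q &&& (q-1)))),
          show 2*(q ^^^ (q &&& (q-1)))/2 = q ^^^ (q &&& (q-1)) from by omega]
      have hblL := pv_bitLength_pos _ hLpos
      have hlhs : pvBitIdx (2*q) off = pvBitIdx q (off+1) := by
        rw [pvBitIdx_eq, show (2*q) % 2 = 0 from by omega, show 2*q/2 = q from by omega]
        simp
      have hrhs : pvBitIdx (2*(q &&& (q-1))) off = pvBitIdx (q &&& (q-1)) (off+1) := by
        rw [pvBitIdx_eq, show (2*(q &&& (q-1))) % 2 = 0 from by omega,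
          show 2*(q &&& (q-1))/2 = q &&& (q-1) from by omega]
        simp
      rw [hlhs, hrhs, hbl, IH q (by omega) hq0 (off+1)]
      congr 1
      omega
    · subst hq
      have hand : (2*q+1) &&& (2*q+1-1) = 2*q := by
        rw [show 2*q+1-1 = 2*q from by omega]; exact pv_and_pred_odd q
      have hxor : (2*q+1) ^^^ ((2*q+1) &&& (2*q+1-1)) = 1 := by
        rw [hand]; exact pv_xor_odd q
      rw [hxor, hand]
      have hbl1 : PySem.Int.bitLength ((1 : Nat) : Int) = 1 := by decide
      rw [hbl1]
      have hlhs : pvBitIdx (2*q+1) off = off :: pvBitIdx q (off+1) := by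
        rw [pvBitIdx_eq, show (2*q+1) % 2 = 1 from by omega, show (2*q+1)/2 = q from by omega]
        simp
      have hrhs : pvBitIdx (2*q) off = pvBitIdx q (off+1) := by
        rw [pvBitIdx_eq, show (2*q) % 2 = 0 from by omega, show 2*q/2 = q from by omega]
        simp
      rw [hlhs, hrhs]
      simp

theorem pvBLoop_spec (d : List (Int × String)) :
    ∀ fuel : Nat, ∀ m : Nat, ∀ mask : Int, mask.toNat = m → 0 ≤ mask → m < fuel → ∀ t,
      pvBLoop d fuel mask t = (pvBitIdx m 0).foldl (pvAdd d) t := by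
  intro fuel
  induction fuel with
  | zero => intro m mask _ _ hlt; omega
  | succ fuel IH =>
    intro m mask hm h0 hlt t
    show (if mask ≤ 0 then t else _) = _
    by_cases hle : mask ≤ 0
    · have hm0 : m = 0 := by omega
      subst hm0
      simp [hle, pvBitIdx_zero]
    · have hM : 0 < m := by omega
      rw [if_neg hle]
      have hband : PySem.Int.band mask (mask - 1) = ((m &&& (m-1) : Nat) : Int) := by
        rw [PySem.Int.band_of_nonneg (by omega) (by omega : (0:Int) ≤ mask - 1)]
        rw [hm, show (mask - 1).toNat = m - 1 from by omega]
      have hxor : PySem.Int.bxor mask (((m &&& (m-1) : Nat) : Int)) = ((m ^^^ (m &&& (m-1)) : Nat) : Int) := by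
        rw [PySem.Int.bxor_of_nonneg (by omega) (Int.natCast_nonneg _)]
        rw [hm, Int.toNat_natCast]
      rw [hband, hxor]
      have hdec := pv_and_pred_lt m hM
      rw [IH (m &&& (m-1)) _ (Int.toNat_natCast _) (Int.natCast_nonneg _) (by omega)]
      rw [pvBitIdx_lsb m hM 0]
      simp [pvAdd]

theorem pv_emod_pow_succ_div_two (x : Int) (k : Nat) :
    (x % 2^(k+1)) / 2 = (x / 2) % 2^k := by
  have hppos : (0:Int) < 2^k := by positivity
  have hq := Int.ediv_add_emod x (2^(k+1))
  set q := x / 2^(k+1) with hqdef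
  set r := x % 2^(k+1) with hrdef
  have hr0 : 0 ≤ r := Int.emod_nonneg x (by positivity)
  have hrlt : r < 2^(k+1) := Int.emod_lt_of_pos x (by positivity)
  have hpow : (2:Int)^(k+1) = 2 * 2^k := by ring
  have hx : x = r + (2^k * q) * 2 := by
    rw [← hq, hpow]; ring
  have hdiv : x / 2 = r / 2 + 2^k * q := by
    rw [hx, Int.add_mul_ediv_right _ _ (by norm_num : (2:Int) ≠ 0)]
  rw [hdiv, Int.add_mul_emod_self_left,
    Int.emod_eq_of_lt (by omega) (by omega : r/2 < 2^k)]

theorem pv_shiftR_succ (a : Int) (i : Nat) : a >>> (i+1) = (a >>> i) / 2 := by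
  simp [Int.shiftRight_eq_div_pow, pow_succ,
    ← Int.ediv_ediv_of_nonneg (by positivity : (0:Int) ≤ (2:Int)^i)]

theorem pvALoop_spec (seq : Int) (d : List (Int × String)) :
    ∀ fuel i t,
      pvALoop seq d fuel i t = (pvBitIdx ((seq >>> i) % (2:Int)^fuel).toNat i).foldl (pvAdd d) t := by
  intro fuel
  induction fuel with
  | zero =>
    intro i t
    simp [pvALoop, pow_zero, Int.emod_one, pvBitIdx_zero]
  | succ k IH =>
    intro i t
    show (if seq >>> i = 0 then t else _) = _
    have hr0 : (0:Int) ≤ (seq >>> i) % 2^(k+1) := Int.emod_nonneg _ (by positivity)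
    have hrlt : (seq >>> i) % 2^(k+1) < 2^(k+1) := Int.emod_lt_of_pos _ (by positivity)
    by_cases hx0 : seq >>> i = 0
    · simp [hx0, pvBitIdx_zero]
    · rw [if_neg hx0]
      have hband : PySem.Int.band (seq >>> i) 1 = (seq >>> i) % 2 := by
        rw [PySem.Int.band_one, PySem.Int.mod_eq_emod_of_pos (by norm_num)]
      have hmod2 : (seq >>> i) % 2^(k+1) % 2 = (seq >>> i) % 2 :=
        Int.emod_emod_of_dvd _ ⟨2^k, by ring⟩
      have hx2a : 0 ≤ (seq >>> i) % 2 := Int.emod_nonneg _ (by norm_num)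
      have hx2b : (seq >>> i) % 2 < 2 := Int.emod_lt_of_pos _ (by norm_num)
      have hdiv : ((seq >>> i) % 2^(k+1)).toNat / 2 = ((seq >>> (i+1)) % 2^k).toNat := by
        rw [pv_shiftR_succ, ← pv_emod_pow_succ_div_two (seq >>> i) k]
        omega
      rw [pvBitIdx_eq, hdiv]
      by_cases hb : PySem.Int.band (seq >>> i) 1 = 1
      · have hodd : ((seq >>> i) % 2^(k+1)).toNat % 2 = 1 := by
          rw [hband] at hb; omega
        rw [if_pos hb, if_pos hodd]
        simp only [List.singleton_append, List.foldl_cons]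
        rw [IH (i+1)]
        rfl
      · have heven : ¬ (((seq >>> i) % 2^(k+1)).toNat % 2 = 1) := by
          rw [hband] at hb; omega
        rw [if_neg hb, if_neg heven]
        simp only [List.nil_append]
        exact IH (i+1) t

theorem pv_band_mask (a : Int) (n : Nat) :
    PySem.Int.band a (((1 : Int) <<< n) - 1) = a % 2^n := by
  have h1 : ((1:Int) <<< n) = 2^n := by rw [Int.shiftLeft_eq]; ring
  rw [h1]
  have hp : (0:Int) < 2^n := by positivity
  have hcast : ((2:Int)^n).toNat = 2^n := by
    rw [show ((2:Int)^n) = ((2^n : Nat) : Int) from by push_cast; ring, Int.toNat_natCast]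
  have hbn : (0:Int) ≤ 2^n - 1 := by omega
  have h2 : ((2:Int)^n - 1).toNat = 2^n - 1 := by omega
  by_cases ha : 0 ≤ a
  · rw [PySem.Int.band_of_nonneg ha hbn, h2, Nat.and_two_pow_sub_one_eq_mod]
    have h3 : ((a.toNat % 2^n : Nat) : Int) = a % 2^n := by
      push_cast
      rw [Int.toNat_of_nonneg ha]
    exact h3
  · have ha' : a < 0 := by omega
    unfold PySem.Int.band
    rw [if_neg (by omega), if_pos hbn, h2]
    have hs : (0:Int) ≤ -a - 1 := by omega
    have hsa : (-a - 1 : Int) = (((-a - 1).toNat : Nat) : Int) := (Int.toNat_of_nonneg hs).symm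
    set s : Nat := (-a - 1).toNat with hsdef
    have hdm := Nat.div_add_mod s (2^n)
    set q := s / 2^n with hqdef
    set r := s % 2^n with hrdef
    have hrlt : r < 2^n := Nat.mod_lt _ (by positivity)
    have hsint : (s : Int) = 2^n * q + r := by
      push_cast [← hdm]
      ring
    have h2n : ((2^n : Nat) : Int) = 2^n := by push_cast; ring
    have hrlt' : (r : Int) < 2^n := by omega
    have hAeq : a = (2^n - 1 - (r:Int)) + 2^n * (-(q:Int) - 1) := by
      have haeq : a = -(s:Int) - 1 := by omega
      rw [haeq, hsint]; ring
    have hcomm : (2^n - 1) &&& s = s &&& (2^n - 1) := Nat.land_comm _ _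
    rw [hcomm, Nat.and_two_pow_sub_one_eq_mod, ← hrdef]
    have hcast2 : ((2^n - 1 - r : Nat) : Int) = 2^n - 1 - (r:Int) := by omega
    rw [hcast2]
    conv_rhs => rw [hAeq]
    rw [Int.add_mul_emod_self_left,
      Int.emod_eq_of_lt (by omega) (by omega : (2:Int)^n - 1 - (r:Int) < 2^n)]

-- ===== VERDICT (by name: the statement is the Claim_ definition above) =====
theorem bitSequence_to_transaction_spec : Claim_equal_bitSequence_to_transaction := by
  intro seq d _hdom _hpre
  unfold Spec_bitSequence_to_transaction bitSequence_to_transaction bitSequence_to_transaction_alt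
  rw [pvALoop_spec seq d d.length 0 PySem.Set.empty]
  rw [pv_band_mask seq d.length]
  rw [pvBLoop_spec d ((seq % 2^d.length).toNat + 1) (seq % 2^d.length).toNat _ rfl
    (Int.emod_nonneg _ (by positivity)) (by omega)]
  have hz : seq >>> (0:Nat) = seq := by
    simp [Int.shiftRight_eq_div_pow]
  rw [hz]
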